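-- pv_equiv track=rewrite | github.com/filatova-elena/lost-souls | scripts/assign_clue_acts.py | find_insertion_point
-- ===== SOURCE A (Python) =====
-- def find_insertion_point(lines: list) -> int:
--     """
--     Find where to insert the 'act:' field.
--     Prefers after 'name:', then 'title:', then 'id:'.
--     Returns the line index after which to insert.
--     """
--     id_line = None
--     name_line = None
--     title_line = None
--
--     for i, line in enumerate(lines):
--         stripped = line.strip()
--         if stripped.startswith('id:'):
--             id_line = i
--         elif stripped.startswith('name:'):
--             name_line = i
--         elif stripped.startswith('title:'):
--             title_line = i
--
--     # Prefer name, then title, then id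
--     if name_line is not None:
--         return name_line
--     elif title_line is not None:
--         return title_line
--     elif id_line is not None:
--         return id_line
--
--     # Fallback: insert after first line
--     return 0
-- ===== SOURCE B (Python) =====
-- def find_insertion_point(lines: list) -> int:
--     """
--     Find where to insert the 'act:' field.
--     Priority-ordered reverse scans: last 'name:' line, else last 'title:',
--     else last 'id:', else 0.
--     """
--     for field in ('name:', 'title:', 'id:'):
--         for i in range(len(lines) - 1, -1, -1):
--             if lines[i].strip().startswith(field):
--                 return i
--     return 0
-- ===== Notes on version B (the rewrite author's own statement) =====
-- stated objective: alternative
-- what changed: Replaces A's single recording pass (three Option registers plus a priority chain) with three priority-ordered reverse scans that early-return at the first (i.e. last-index) matching line.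
import Mathlib
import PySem

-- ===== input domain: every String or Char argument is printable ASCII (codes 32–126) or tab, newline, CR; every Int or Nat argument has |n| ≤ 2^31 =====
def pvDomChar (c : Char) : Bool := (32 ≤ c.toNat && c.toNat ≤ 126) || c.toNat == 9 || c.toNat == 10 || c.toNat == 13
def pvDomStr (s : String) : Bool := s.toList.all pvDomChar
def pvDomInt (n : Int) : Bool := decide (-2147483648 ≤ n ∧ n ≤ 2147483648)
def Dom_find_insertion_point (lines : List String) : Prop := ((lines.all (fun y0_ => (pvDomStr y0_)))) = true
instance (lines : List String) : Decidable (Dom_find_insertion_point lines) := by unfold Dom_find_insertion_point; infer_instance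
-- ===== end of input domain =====

-- B replaces A's single recording pass with three priority-ordered reverse scans (alternative decomposition, same cost).

-- ===== PORT A =====
-- state is (id_line, name_line, title_line)
def pvAStep (s : Option Int × Option Int × Option Int) (i : Int) (line : String) :
    Option Int × Option Int × Option Int :=
  let stripped := PySem.Str.strip line
  if PySem.Str.startswith stripped "id:" then (some i, s.2.1, s.2.2)
  else if PySem.Str.startswith stripped "name:" then (s.1, some i, s.2.2)
  else if PySem.Str.startswith stripped "title:" then (s.1, s.2.1, some i)
  else s

def pvALoop (i : Int) (s : Option Int × Option Int × Option Int) :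
    List String → Option Int × Option Int × Option Int
  | [] => s
  | l :: ls => pvALoop (i + 1) (pvAStep s i l) ls

def find_insertion_point (lines : List String) : Int :=
  let s := pvALoop 0 (none, none, none) lines
  match s.2.1 with
  | some n => n
  | none =>
    match s.2.2 with
    | some t => t
    | none =>
      match s.1 with
      | some j => j
      | none => 0

-- ===== PORT B =====
-- reverse scan: checks the tail (higher indices) first, so the first hit is the LAST matching index
def pvRScan (pfx : String) : List String → Option Int
  | [] => none
  | l :: ls =>
    match pvRScan pfx ls with
    | some j => some (j + 1)
    | none => if PySem.Str.startswith (PySem.Str.strip l) pfx then some 0 else none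

def find_insertion_point_alt (lines : List String) : Int :=
  match pvRScan "name:" lines with
  | some i => i
  | none =>
    match pvRScan "title:" lines with
    | some i => i
    | none =>
      match pvRScan "id:" lines with
      | some i => i
      | none => 0

-- ===== PRECONDITION & SPEC =====
def Spec_find_insertion_point (lines : List String) (out : Int) : Prop := out = find_insertion_point_alt lines
instance (lines : List String) (out : Int) : Decidable (Spec_find_insertion_point lines out) := by unfold Spec_find_insertion_point; infer_instance

-- ===== CLAIM (what is proved, stated in full; the proofs are below) =====
def Claim_equal_find_insertion_point : Prop := ∀ (lines : List String), Dom_find_insertion_point lines → Spec_find_insertion_point lines (find_insertion_point lines)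

-- ===== LEMMAS AND PROOFS =====

-- no string starts with two of the three field prefixes (their first characters differ)
theorem pv_excl (st : String) (p q : String) (hp : p.toList ≠ []) (hq : q.toList ≠ [])
    (h : p.toList.head hp ≠ q.toList.head hq)
    (h1 : PySem.Str.startswith st p = true) : PySem.Str.startswith st q = false := by
  by_contra hc
  rw [Bool.not_eq_false] at hc
  rw [PySem.Str.startswith_eq, PySem.Chars.startswith_iff] at h1 hc
  rcases h1 with ⟨t1, e1⟩
  rcases hc with ⟨t2, e2⟩
  cases hp' : p.toList with
  | nil => exact hp hp'
  | cons a as =>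
    cases hq' : q.toList with
    | nil => exact hq hq'
    | cons b bs =>
      rw [hp'] at e1; rw [hq'] at e2
      rw [← e1] at e2
      simp at e2
      apply h
      simp [hp', hq', e2.1]

def pvMerge (old : Option Int) (r : Option Int) (i : Int) : Option Int :=
  match r with
  | some j => some (i + j)
  | none => old

theorem pv_loop_eq (ls : List String) : ∀ (i : Int) (s : Option Int × Option Int × Option Int),
    pvALoop i s ls =
      (pvMerge s.1 (pvRScan "id:" ls) i,
       pvMerge s.2.1 (pvRScan "name:" ls) i,
       pvMerge s.2.2 (pvRScan "title:" ls) i) := by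
  induction ls with
  | nil => intro i s; simp [pvALoop, pvRScan, pvMerge]
  | cons l ls ih =>
    intro i s
    rw [pvALoop, ih]
    have e1 := pv_excl (PySem.Str.strip l) "id:" "name:" (by decide) (by decide) (by decide)
    have e2 := pv_excl (PySem.Str.strip l) "id:" "title:" (by decide) (by decide) (by decide)
    have e3 := pv_excl (PySem.Str.strip l) "name:" "id:" (by decide) (by decide) (by decide)
    have e4 := pv_excl (PySem.Str.strip l) "name:" "title:" (by decide) (by decide) (by decide)
    have e5 := pv_excl (PySem.Str.strip l) "title:" "id:" (by decide) (by decide) (by decide)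
    have e6 := pv_excl (PySem.Str.strip l) "title:" "name:" (by decide) (by decide) (by decide)
    rcases h1 : pvRScan "id:" ls with _ | j1 <;>
    rcases h2 : pvRScan "name:" ls with _ | j2 <;>
    rcases h3 : pvRScan "title:" ls with _ | j3 <;>
      simp only [pvRScan, h1, h2, h3, pvMerge, pvAStep] <;>
      (try split_ifs with b1 b2 b3) <;>
      (try simp_all [pvMerge]) <;> omega

theorem find_insertion_point_eq_alt (lines : List String) :
    find_insertion_point lines = find_insertion_point_alt lines := by
  unfold find_insertion_point find_insertion_point_alt
  rw [pv_loop_eq]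
  rcases h1 : pvRScan "name:" lines with _ | j1 <;>
  rcases h2 : pvRScan "title:" lines with _ | j2 <;>
  rcases h3 : pvRScan "id:" lines with _ | j3 <;>
    simp [pvMerge]

-- ===== VERDICT (by name: the statement is the Claim_ definition above) =====
theorem find_insertion_point_spec : Claim_equal_find_insertion_point := by
  intro lines _
  unfold Spec_find_insertion_point
  exact find_insertion_point_eq_alt lines
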